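-- pv_equiv track=rewrite | github.com/enai-computer/marae | app/provider/crossProviderPrompts.py | filter_context_by_tokens
-- ===== SOURCE A (Python) =====
-- from typing import List
--
-- def filter_context_by_tokens(context: List[str], remaining_tokens: int) -> List[str]:
--     """Filter context items to fit within remaining token limit.
--     Assumes 4 characters per token as a rough approximation."""
--     filtered_context = []
--     tokens_used = 0
--
--     for item in context:
--         # Estimate tokens for this context item
--         item_tokens = len(item) // 4
--
--         # Check if adding this item would exceed the limit
--         if tokens_used + item_tokens <= remaining_tokens:
--             filtered_context.append(item)
--             tokens_used += item_tokens
--         else: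
--             break
--
--     return filtered_context
-- ===== SOURCE B (Python) =====
-- from typing import List
--
-- def filter_context_by_tokens(context: List[str], remaining_tokens: int) -> List[str]:
--     """Prefix-sum formulation: build cumulative token totals, then take the
--     longest prefix whose cumulative total stays within the budget."""
--     totals = []
--     running = 0
--     for item in context:
--         running += len(item) // 4
--         totals.append(running)
--     cut = 0
--     for t in totals:
--         if t > remaining_tokens:
--             break
--         cut += 1
--     return context[:cut]
-- ===== Notes on version B (the rewrite author's own statement) =====
-- stated objective: alternative
-- what changed: Replaced the single break-on-overflow accumulator loop with a two-phase decomposition: build the list of cumulative token totals first, then select the longest prefix whose cumulative total fits the budget and slice it off.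
import Mathlib
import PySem

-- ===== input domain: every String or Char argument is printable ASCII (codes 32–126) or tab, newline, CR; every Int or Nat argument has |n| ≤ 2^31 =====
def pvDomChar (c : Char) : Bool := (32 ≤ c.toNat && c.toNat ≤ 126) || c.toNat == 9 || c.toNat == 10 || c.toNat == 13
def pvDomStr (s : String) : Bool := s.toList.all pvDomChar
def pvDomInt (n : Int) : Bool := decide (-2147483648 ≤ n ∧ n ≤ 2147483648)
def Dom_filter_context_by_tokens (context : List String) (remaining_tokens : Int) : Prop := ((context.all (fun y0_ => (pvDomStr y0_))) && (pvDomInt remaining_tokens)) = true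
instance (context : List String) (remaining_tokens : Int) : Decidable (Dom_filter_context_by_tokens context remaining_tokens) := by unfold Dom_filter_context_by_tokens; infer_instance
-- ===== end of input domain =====

-- B changes A's single break-on-overflow loop into a two-phase decomposition
-- (cumulative totals, then longest fitting prefix); same cost, no speed claim.

-- ===== PORT A =====
-- for item in context: take item while tokens_used + len(item)//4 <= remaining_tokens, else break
def pvA_go (remaining_tokens : Int) : List String → Int → List String
  | [], _ => []
  | item :: rest, tokens_used =>
    let item_tokens := PySem.Int.floordiv (item.length : Int) 4
    if tokens_used + item_tokens ≤ remaining_tokens then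
      item :: pvA_go remaining_tokens rest (tokens_used + item_tokens)
    else
      []

def filter_context_by_tokens (context : List String) (remaining_tokens : Int) : List String :=
  pvA_go remaining_tokens context 0

-- ===== PORT B =====
-- totals: the running cumulative token totals (first loop of Source B)
def pvB_totals : List String → Int → List Int
  | [], _ => []
  | item :: rest, running =>
    let running' := running + PySem.Int.floordiv (item.length : Int) 4
    running' :: pvB_totals rest running'

-- cut: counting loop with break (second loop of Source B)
def pvB_cut (remaining_tokens : Int) : List Int → Nat → Nat
  | [], cut => cut
  | t :: ts, cut => if remaining_tokens < t then cut else pvB_cut remaining_tokens ts (cut + 1)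

def filter_context_by_tokens_alt (context : List String) (remaining_tokens : Int) : List String :=
  context.take (pvB_cut remaining_tokens (pvB_totals context 0) 0)

-- ===== PRECONDITION & SPEC =====
def Spec_filter_context_by_tokens (context : List String) (remaining_tokens : Int) (out : List String) : Prop := out = filter_context_by_tokens_alt context remaining_tokens
instance (context : List String) (remaining_tokens : Int) (out : List String) : Decidable (Spec_filter_context_by_tokens context remaining_tokens out) := by unfold Spec_filter_context_by_tokens; infer_instance

-- ===== CLAIM (what is proved, stated in full; the proofs are below) =====
def Claim_equal_filter_context_by_tokens : Prop := ∀ (context : List String) (remaining_tokens : Int), Dom_filter_context_by_tokens context remaining_tokens → Spec_filter_context_by_tokens context remaining_tokens (filter_context_by_tokens context remaining_tokens)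

-- ===== LEMMAS AND PROOFS =====

-- the counting loop's accumulator only shifts the result
theorem pvB_cut_succ (rt : Int) (ts : List Int) (n : Nat) :
    pvB_cut rt ts (n + 1) = pvB_cut rt ts n + 1 := by
  induction ts generalizing n with
  | nil => simp [pvB_cut]
  | cons t ts ih =>
    simp only [pvB_cut]
    split_ifs with h
    · rfl
    · exact ih (n + 1)

theorem pv_key (rt : Int) (ctx : List String) (used : Int) :
    pvA_go rt ctx used = ctx.take (pvB_cut rt (pvB_totals ctx used) 0) := by
  induction ctx generalizing used with
  | nil => simp [pvA_go, pvB_totals, pvB_cut]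
  | cons item rest ih =>
    simp only [pvA_go, pvB_totals, pvB_cut]
    simp only [PySem.Int.floordiv]
    by_cases h : used + Int.fdiv (item.length : Int) 4 ≤ rt
    · rw [if_pos h, if_neg (not_lt.mpr h), pvB_cut_succ, List.take_succ_cons, ih]
    · rw [if_neg h, if_pos (not_le.mp h), List.take_zero]

-- ===== VERDICT (by name) =====
theorem filter_context_by_tokens_spec : Claim_equal_filter_context_by_tokens := by
  intro context remaining_tokens _
  unfold Spec_filter_context_by_tokens filter_context_by_tokens filter_context_by_tokens_alt
  exact pv_key remaining_tokens context 0
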